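-- pv_equiv track=rewrite | github.com/Cross-bit/group-consensus-eval | evaluation_frameworks/consensus_evaluation/evaluation/evaluations/print/table_rfc_large_group_size_comparisions.py | strategy_2_slug
-- ===== SOURCE A (Python) =====
-- from typing import Any, Dict, List, Optional, Sequence
--
-- def strategy_2_slug(algos: List[str]) -> Dict[str, str]:
--     # Stable slug mapping aligned with canonical naming:
--     # A0=async-static-group, A1=async-static-individual, A2=async-sigmoid-individual,
--     # S0=sync-no-feedback, S1=sync-ema, H0/H1=hybrid variants.
--     fixed = {
--         "eval_large_hybrid_general_rec_individual.py": "H0",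
--         "eval_large_hybrid_group_updatable.py": "H1",
--         "eval_large_sync_without_feedback.py": "S0",
--         "eval_large_sync_with_feedback_ema.py": "S1",
--         "eval_async_static_policy_simple_priority_function_group_rec.py": "A0",
--         "eval_async_static_policy_simple_priority_function_individual_rec.py": "A1",
--         "eval_async_with_sigmoid_policy_simple_priority_individual_rec.py": "A2",
--         # extra (not in main canonical table)
--         "eval_async_with_sigmoid_policy_simple_priority_group_rec.py": "AX",
--     }
--
--     res: Dict[str, str] = {}
--     used = set()
--     sync_ctr = 2
--     async_ctr = 3
--     hybrid_ctr = 2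
--     for algo_name in algos:
--         if algo_name in fixed:
--             slug = fixed[algo_name]
--             res[slug] = algo_name
--             used.add(slug)
--             continue
--         if "async" in algo_name:
--             while f"A{async_ctr}" in used:
--                 async_ctr += 1
--             res[f"A{async_ctr}"] = algo_name
--             used.add(f"A{async_ctr}")
--             async_ctr += 1
--         elif "hybrid" in algo_name:
--             while f"H{hybrid_ctr}" in used:
--                 hybrid_ctr += 1
--             res[f"H{hybrid_ctr}"] = algo_name
--             used.add(f"H{hybrid_ctr}")
--             hybrid_ctr += 1
--         else:
--             while f"S{sync_ctr}" in used:
--                 sync_ctr += 1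
--             res[f"S{sync_ctr}"] = algo_name
--             used.add(f"S{sync_ctr}")
--             sync_ctr += 1
--     return res
-- ===== SOURCE B (Python) =====
-- def strategy_2_slug(algos):
--     FIXED = {
--         "eval_large_hybrid_general_rec_individual.py": "H0",
--         "eval_large_hybrid_group_updatable.py": "H1",
--         "eval_large_sync_without_feedback.py": "S0",
--         "eval_large_sync_with_feedback_ema.py": "S1",
--         "eval_async_static_policy_simple_priority_function_group_rec.py": "A0",
--         "eval_async_static_policy_simple_priority_function_individual_rec.py": "A1",
--         "eval_async_with_sigmoid_policy_simple_priority_individual_rec.py": "A2",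
--         "eval_async_with_sigmoid_policy_simple_priority_group_rec.py": "AX",
--     }
--     START = {"A": 3, "H": 2, "S": 2}
--
--     def cls(name):
--         return "A" if "async" in name else "H" if "hybrid" in name else "S"
--
--     # Each name's slug is a pure function of its position: fixed names use the
--     # table; any other name gets its class letter followed by the class start
--     # offset plus the number of earlier non-fixed names of the same class.
--     pairs = [
--         (FIXED[name] if name in FIXED else
--          cls(name) + str(START[cls(name)]
--                          + sum(1 for m in algos[:i]
--                                if m not in FIXED and cls(m) == cls(name))),
--          name)
--         for i, name in enumerate(algos)
--     ]
--     return dict(pairs)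
-- ===== Notes on version B (the rewrite author's own statement) =====
-- stated objective: alternative
-- what changed: B computes each name's slug by a closed-form position count (table lookup for fixed names, otherwise class letter + start offset + number of earlier non-fixed names of the same class) in one comprehension and builds the dict at once, eliminating A's mutable counters, 'used' set and while loops (which are provably dead).
import Mathlib
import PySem

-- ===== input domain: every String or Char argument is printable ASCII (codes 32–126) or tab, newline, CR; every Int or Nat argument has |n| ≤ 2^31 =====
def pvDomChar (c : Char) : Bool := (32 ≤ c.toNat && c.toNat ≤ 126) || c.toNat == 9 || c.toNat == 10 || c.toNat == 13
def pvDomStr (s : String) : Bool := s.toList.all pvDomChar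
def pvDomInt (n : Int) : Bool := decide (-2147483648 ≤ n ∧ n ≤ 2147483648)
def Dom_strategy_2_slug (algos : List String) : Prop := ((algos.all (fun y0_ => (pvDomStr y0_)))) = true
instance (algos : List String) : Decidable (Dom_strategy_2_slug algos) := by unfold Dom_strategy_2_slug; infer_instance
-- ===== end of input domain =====

-- B replaces A's mutable counters, 'used' set and (dead) while loops by a closed-form
-- per-position slug computation and a single dict construction (alternative decomposition).


-- ===== PORT A =====
-- the 'fixed' dict literal (distinct keys), as an insertion-ordered association list
def pvFixed : List (String × String) :=
  [("eval_large_hybrid_general_rec_individual.py", "H0"),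
   ("eval_large_hybrid_group_updatable.py", "H1"),
   ("eval_large_sync_without_feedback.py", "S0"),
   ("eval_large_sync_with_feedback_ema.py", "S1"),
   ("eval_async_static_policy_simple_priority_function_group_rec.py", "A0"),
   ("eval_async_static_policy_simple_priority_function_individual_rec.py", "A1"),
   ("eval_async_with_sigmoid_policy_simple_priority_individual_rec.py", "A2"),
   ("eval_async_with_sigmoid_policy_simple_priority_group_rec.py", "AX")]

-- 'algo_name in fixed' / 'fixed[algo_name]' as one first-match lookup (keys are distinct)
def pvFixedGet? (name : String) : Option String :=
  (pvFixed.find? (fun kv => kv.1 == name)).map Prod.snd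

-- 'while f"{pfx}{ctr}" in used: ctr += 1'; the fuel 'used.length + 1' always suffices
-- because each iteration needs a distinct member of 'used' (under the proved invariant
-- the loop in fact exits immediately)
def pvWhileFree (pfx : String) (used : PySem.Set String) : Int → Nat → Int
  | ctr, 0 => ctr
  | ctr, fuel + 1 =>
      if PySem.Set.contains used (pfx ++ PySem.Int.toStr ctr) then
        pvWhileFree pfx used (ctr + 1) fuel
      else ctr

-- one iteration of A's for-loop over (res, used, sync_ctr, async_ctr, hybrid_ctr)
def pvStepA (st : PySem.Dict String String × PySem.Set String × Int × Int × Int)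
    (name : String) : PySem.Dict String String × PySem.Set String × Int × Int × Int :=
  match st with
  | (res, used, sync_ctr, async_ctr, hybrid_ctr) =>
    match pvFixedGet? name with
    | some slug => (res.insert slug name, PySem.Set.add used slug, sync_ctr, async_ctr, hybrid_ctr)
    | none =>
      if PySem.Str.isIn "async" name then
        let k := pvWhileFree "A" used async_ctr (used.length + 1)
        let slug := "A" ++ PySem.Int.toStr k
        (res.insert slug name, PySem.Set.add used slug, sync_ctr, k + 1, hybrid_ctr)
      else if PySem.Str.isIn "hybrid" name then
        let k := pvWhileFree "H" used hybrid_ctr (used.length + 1)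
        let slug := "H" ++ PySem.Int.toStr k
        (res.insert slug name, PySem.Set.add used slug, sync_ctr, async_ctr, k + 1)
      else
        let k := pvWhileFree "S" used sync_ctr (used.length + 1)
        let slug := "S" ++ PySem.Int.toStr k
        (res.insert slug name, PySem.Set.add used slug, k + 1, async_ctr, hybrid_ctr)

def strategy_2_slug (algos : List String) : List (String × String) :=
  (algos.foldl pvStepA (PySem.Dict.empty, PySem.Set.empty, (2 : Int), (3 : Int), (2 : Int))).1.items

-- ===== PORT B =====
def pvClassOf (name : String) : String :=
  if PySem.Str.isIn "async" name then "A"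
  else if PySem.Str.isIn "hybrid" name then "H"
  else "S"

def pvStartOf (c : String) : Int := if c = "A" then 3 else 2

-- the slug of one name, given the list 'pre' of names before it (algos[:i])
def pvSlugOf (pre : List String) (name : String) : String :=
  match pvFixedGet? name with
  | some s => s
  | none =>
      let c := pvClassOf name
      c ++ PySem.Int.toStr (pvStartOf c +
        (pre.countP (fun m => !(pvFixedGet? m).isSome && pvClassOf m == c) : Int))

def strategy_2_slug_alt (algos : List String) : List (String × String) :=
  (PySem.Dict.ofList ((PySem.List.enumerate algos).map
    (fun q => (pvSlugOf (PySem.List.slice algos none (some q.1)) q.2, q.2)))).items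

-- ===== PRECONDITION & SPEC =====
def Spec_strategy_2_slug (algos : List String) (out : List (String × String)) : Prop := out = strategy_2_slug_alt algos
instance (algos : List String) (out : List (String × String)) : Decidable (Spec_strategy_2_slug algos out) := by unfold Spec_strategy_2_slug; infer_instance

-- ===== CLAIM (what is proved, stated in full; the proofs are below) =====
def Claim_equal_strategy_2_slug : Prop := ∀ (algos : List String), Dom_strategy_2_slug algos → Spec_strategy_2_slug algos (strategy_2_slug algos)

-- ===== LEMMAS AND PROOFS =====

-- decimal digits of n, most significant first (what Nat.toDigits 10 computes)
def digRev (n : Nat) : List Char :=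
  if n < 10 then [Nat.digitChar n]
  else digRev (n / 10) ++ [Nat.digitChar (n % 10)]
decreasing_by exact Nat.div_lt_self (by omega) (by omega)

theorem toDigitsCore_eq_digRev : ∀ (f n : Nat) (acc : List Char), n < f →
    Nat.toDigitsCore 10 f n acc = digRev n ++ acc := by
  intro f
  induction f with
  | zero => omega
  | succ f ih =>
    intro n acc h
    rw [Nat.toDigitsCore]
    by_cases h10 : n / 10 = 0
    · have hn : n < 10 := by omega
      rw [if_pos h10, digRev, if_pos hn, Nat.mod_eq_of_lt hn]
      rfl
    · have hge : ¬ n < 10 := by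
        intro hlt; interval_cases n <;> simp_all
      have hlt : n / 10 < f := by
        have := Nat.div_lt_self (n := n) (by omega) (by norm_num : 1 < 10)
        omega
      rw [if_neg h10, ih _ _ hlt]
      conv_rhs => rw [digRev]
      rw [if_neg hge, List.append_assoc]
      rfl

theorem toDigits_eq_digRev (n : Nat) : Nat.toDigits 10 n = digRev n := by
  rw [Nat.toDigits]
  simpa using toDigitsCore_eq_digRev (n + 1) n [] (by omega)

theorem digRev_ne_nil (n : Nat) : digRev n ≠ [] := by
  rw [digRev]; split <;> simp

theorem digRev_digit {n : Nat} : ∀ c ∈ digRev n, '0' ≤ c ∧ c ≤ '9' := by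
  induction n using Nat.strong_induction_on with
  | _ n ih =>
    intro c hc
    rw [digRev] at hc
    split at hc
    · rename_i hn
      simp at hc
      subst hc
      interval_cases n <;> exact ⟨by decide, by decide⟩
    · rename_i hn
      rcases List.mem_append.1 hc with h | h
      · exact ih (n / 10) (Nat.div_lt_self (by omega) (by omega)) c h
      · simp at h; subst h
        have : n % 10 < 10 := Nat.mod_lt _ (by omega)
        interval_cases hm : n % 10 <;> simp_all <;> exact ⟨by decide, by decide⟩

theorem digitChar_inj : ∀ m < 10, ∀ n < 10, Nat.digitChar m = Nat.digitChar n → m = n := by decide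

theorem digRev_inj : ∀ m n : Nat, digRev m = digRev n → m = n := by
  intro m
  induction m using Nat.strong_induction_on with
  | _ m ih =>
    intro n h
    rw [digRev.eq_def m, digRev.eq_def n] at h
    split at h <;> split at h
    · rename_i hm hn
      simp at h
      exact digitChar_inj m hm n hn h
    · rename_i hm hn
      have hlen : ([Nat.digitChar m] : List Char).length
          = (digRev (n / 10) ++ [Nat.digitChar (n % 10)]).length := by rw [h]
      simp at hlen
      cases hq : digRev (n / 10) <;> simp_all [digRev_ne_nil]
    · rename_i hm hn
      have hlen : (digRev (m / 10) ++ [Nat.digitChar (m % 10)]).length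
          = ([Nat.digitChar n] : List Char).length := by rw [h]
      simp at hlen
      cases hq : digRev (m / 10) <;> simp_all [digRev_ne_nil]
    · rename_i hm hn
      rw [← List.concat_eq_append, ← List.concat_eq_append, List.concat_inj] at h
      have h1 := ih (m / 10) (Nat.div_lt_self (by omega) (by omega)) (n / 10) h.1
      have h2 := digitChar_inj (m % 10) (Nat.mod_lt _ (by omega)) (n % 10)
        (Nat.mod_lt _ (by omega)) h.2
      omega

theorem digRev_zero : digRev 0 = ['0'] := by rw [digRev]; norm_num; decide
theorem digRev_one : digRev 1 = ['1'] := by rw [digRev]; norm_num; decide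
theorem digRev_two : digRev 2 = ['2'] := by rw [digRev]; norm_num; decide

theorem toStr_toList {k : Int} (h : 0 ≤ k) :
    (PySem.Int.toStr k).toList = digRev k.toNat := by
  rw [PySem.Int.toList_toStr, PySem.Int.toChars, if_neg (by omega), toDigits_eq_digRev]

theorem slug_toList (c : String) {k : Int} (h : 0 ≤ k) :
    (c ++ PySem.Int.toStr k).toList = c.toList ++ digRev k.toNat := by
  simp [toStr_toList h]

-- the pairs B builds, and the per-class count of non-fixed names
def pvPairs (algos : List String) : List (String × String) :=
  (PySem.List.enumerate algos).map
    (fun q => (pvSlugOf (PySem.List.slice algos none (some q.1)) q.2, q.2))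

def pvCnt (c : String) (p : List String) : Nat :=
  p.countP (fun m => !(pvFixedGet? m).isSome && pvClassOf m == c)

def pvState (p : List String) :
    PySem.Dict String String × PySem.Set String × Int × Int × Int :=
  (PySem.Dict.ofList (pvPairs p),
   PySem.Set.ofList ((pvPairs p).map Prod.fst),
   2 + (pvCnt "S" p : Int), 3 + (pvCnt "A" p : Int), 2 + (pvCnt "H" p : Int))

theorem enumerate_append_singleton {α : Type} (l : List α) (x : α) (s : Int) :
    PySem.List.enumerate (l ++ [x]) s
      = PySem.List.enumerate l s ++ [(s + l.length, x)] := by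
  induction l generalizing s with
  | nil => simp [PySem.List.enumerate]
  | cons y t ih =>
      simp [PySem.List.enumerate, ih (s + 1)]
      ring_nf

theorem enumerate_fst {α : Type} {l : List α} {s : Int} {q : Int × α}
    (h : q ∈ PySem.List.enumerate l s) : ∃ k : Nat, q.1 = s + k ∧ k < l.length := by
  induction l generalizing s with
  | nil => simp [PySem.List.enumerate] at h
  | cons y t ih =>
      simp [PySem.List.enumerate] at h
      rcases h with h | h
      · exact ⟨0, by simp [h], by simp⟩
      · obtain ⟨k, hk, hlt⟩ := ih h
        exact ⟨k + 1, by push_cast; omega, by simp; omega⟩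

theorem pvPairs_append (p : List String) (x : String) :
    pvPairs (p ++ [x]) = pvPairs p ++ [(pvSlugOf p x, x)] := by
  unfold pvPairs
  rw [enumerate_append_singleton, List.map_append]
  congr 1
  · apply List.map_congr_left
    intro q hq
    obtain ⟨k, hk1, hk2⟩ := enumerate_fst hq
    have : PySem.List.slice (p ++ [x]) none (some q.1)
        = PySem.List.slice p none (some q.1) := by
      rw [hk1]
      simp only [zero_add]
      rw [PySem.List.slice_to_natCast, PySem.List.slice_to_natCast,
        List.take_append_of_le_length (by omega)]
    rw [this]
  · simp only [List.map_cons, List.map_nil]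
    congr 2
    simp only [zero_add]
    rw [PySem.List.slice_to_natCast, List.take_left]

theorem pvCnt_append (c : String) (p : List String) (x : String) :
    pvCnt c (p ++ [x]) = pvCnt c p
      + (if (!(pvFixedGet? x).isSome && pvClassOf x == c) then 1 else 0) := by
  unfold pvCnt
  rw [List.countP_append]
  simp [List.countP_cons]

theorem classOf_cases (x : String) :
    pvClassOf x = "A" ∨ pvClassOf x = "H" ∨ pvClassOf x = "S" := by
  unfold pvClassOf; split_ifs <;> simp

theorem fixed_snd {kv : String × String} (h : kv ∈ pvFixed) :
    kv.2 = "H0" ∨ kv.2 = "H1" ∨ kv.2 = "S0" ∨ kv.2 = "S1" ∨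
    kv.2 = "A0" ∨ kv.2 = "A1" ∨ kv.2 = "A2" ∨ kv.2 = "AX" := by
  simp [pvFixed] at h
  rcases h with h | h | h | h | h | h | h | h <;> simp [h]

theorem mem_pairs_fst : ∀ {p : List String} {s : String},
    s ∈ (pvPairs p).map Prod.fst →
    (∃ kv ∈ pvFixed, kv.2 = s) ∨
    ∃ c, (c = "A" ∨ c = "H" ∨ c = "S") ∧
      ∃ j : Nat, j < pvCnt c p ∧ s = c ++ PySem.Int.toStr (pvStartOf c + (j : Int)) := by
  intro p
  induction p using List.reverseRecOn with
  | nil => intro s h; simp [pvPairs, PySem.List.enumerate] at h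
  | append_singleton p x ih =>
    intro s h
    rw [pvPairs_append, List.map_append] at h
    rcases List.mem_append.1 h with h | h
    · rcases ih h with h | ⟨c, hc, j, hj, hs⟩
      · exact Or.inl h
      · refine Or.inr ⟨c, hc, j, ?_, hs⟩
        rw [pvCnt_append]
        split <;> omega
    · simp at h
      subst h
      cases hfix : pvFixedGet? x with
      | some v =>
          left
          have hslug : pvSlugOf p x = v := by unfold pvSlugOf; rw [hfix]
          rw [hslug]
          unfold pvFixedGet? at hfix
          cases hfind : pvFixed.find? (fun kv => kv.1 == x) with
          | none => rw [hfind] at hfix; simp at hfix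
          | some kv =>
              rw [hfind] at hfix
              simp at hfix
              exact ⟨kv, List.mem_of_find?_eq_some hfind, hfix⟩
      | none =>
          right
          have hslug : pvSlugOf p x = pvClassOf x ++ PySem.Int.toStr
              (pvStartOf (pvClassOf x) + (pvCnt (pvClassOf x) p : Int)) := by
            unfold pvSlugOf; rw [hfix]; rfl
          rw [hslug]
          refine ⟨pvClassOf x, classOf_cases x, pvCnt (pvClassOf x) p, ?_, rfl⟩
          rw [pvCnt_append]
          simp [hfix]

theorem digRev_ne_small {m : Nat} (hm : 2 ≤ m) :
    digRev m ≠ ['0'] ∧ digRev m ≠ ['1'] ∧ (3 ≤ m → digRev m ≠ ['2']) ∧ digRev m ≠ ['X'] := by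
  refine ⟨?_, ?_, ?_, ?_⟩
  · intro h; have := digRev_inj m 0 (by rw [h, digRev_zero]); omega
  · intro h; have := digRev_inj m 1 (by rw [h, digRev_one]); omega
  · intro h3 h; have := digRev_inj m 2 (by rw [h, digRev_two]); omega
  · intro h
    have := digRev_digit (n := m) 'X' (by rw [h]; simp)
    revert this; decide

-- the freshly computed counter slug is not among the slugs already assigned
theorem fresh (p : List String) (c : String) (hc : c = "A" ∨ c = "H" ∨ c = "S") :
    (c ++ PySem.Int.toStr (pvStartOf c + (pvCnt c p : Int))) ∉ (pvPairs p).map Prod.fst := by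
  intro hmem
  have hstart : pvStartOf c = 3 ∨ pvStartOf c = 2 := by
    rcases hc with h | h | h <;> subst h <;> simp [pvStartOf]
  have hge : (2 : Int) ≤ pvStartOf c + (pvCnt c p : Int) := by
    rcases hstart with h | h <;> rw [h] <;> omega
  have h0 : (0 : Int) ≤ pvStartOf c + (pvCnt c p : Int) := by omega
  rcases mem_pairs_fst hmem with ⟨kv, hkv, hv⟩ | ⟨c', hc', j, hj, hs⟩
  · -- equal to a fixed slug: impossible
    have hlist := congrArg String.toList hv.symm
    rw [slug_toList c h0] at hlist
    have hds := digRev_ne_small (m := (pvStartOf c + (pvCnt c p : Int)).toNat) (by omega)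
    have h3 : pvStartOf c = 3 → 3 ≤ (pvStartOf c + (pvCnt c p : Int)).toNat := by
      intro h; omega
    rcases fixed_snd hkv with h | h | h | h | h | h | h | h <;>
      rw [h] at hlist <;>
      rcases hc with hcc | hcc | hcc <;>
        subst hcc <;> simp_all [pvStartOf] <;> omega
  · -- equal to an earlier counter slug: impossible
    have h0' : (0 : Int) ≤ pvStartOf c' + (j : Int) := by
      rcases hc' with h | h | h <;> subst h <;> simp [pvStartOf] <;> omega
    have hlist := congrArg String.toList hs
    rw [slug_toList c h0, slug_toList c' h0'] at hlist
    rcases hc with h1 | h1 | h1 <;> rcases hc' with h2 | h2 | h2 <;>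
      subst h1 <;> subst h2
    all_goals simp at hlist
    all_goals
      have := digRev_inj _ _ hlist
      simp [pvStartOf] at h0 h0' hj this ⊢
      omega

theorem whileFree_stop (pfx : String) (used : PySem.Set String) (ctr : Int) (fuel : Nat)
    (h : (pfx ++ PySem.Int.toStr ctr) ∉ used) :
    pvWhileFree pfx used ctr (fuel + 1) = ctr := by
  have hc : PySem.Set.contains used (pfx ++ PySem.Int.toStr ctr) = false := by
    rw [← Bool.not_eq_true, PySem.Set.contains_iff]; exact h
  rw [pvWhileFree, hc]
  simp

theorem dict_ofList_append_singleton (l : List (String × String)) (x : String × String) :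
    PySem.Dict.ofList (l ++ [x]) = (PySem.Dict.ofList l).insert x.1 x.2 := by
  simp [PySem.Dict.ofList, PySem.Dict.update, List.foldl_append]

theorem foldl_stepA_eq (p : List String) :
    p.foldl pvStepA (PySem.Dict.empty, PySem.Set.empty, (2 : Int), (3 : Int), (2 : Int))
      = pvState p := by
  induction p using List.reverseRecOn with
  | nil => simp [pvState, pvPairs, pvCnt, PySem.List.enumerate]; rfl
  | append_singleton p x ih =>
    rw [List.foldl_append, ih]
    show pvStepA (pvState p) x = pvState (p ++ [x])
    unfold pvState pvStepA
    cases hfix : pvFixedGet? x with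
    | some slug =>
        simp only []
        rw [pvPairs_append]
        have hslug : pvSlugOf p x = slug := by unfold pvSlugOf; rw [hfix]
        rw [hslug]
        refine Prod.ext ?_ (Prod.ext ?_ (Prod.ext ?_ (Prod.ext ?_ ?_))) <;> simp only []
        · rw [dict_ofList_append_singleton]
        · simp only [List.map_append, List.map_cons, List.map_nil, PySem.Set.ofList_append_singleton]
        · rw [pvCnt_append]; simp [hfix]
        · rw [pvCnt_append]; simp [hfix]
        · rw [pvCnt_append]; simp [hfix]
    | none =>
        have hcnt_other : ∀ c, pvClassOf x ≠ c → pvCnt c (p ++ [x]) = pvCnt c p := by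
          intro c hne
          rw [pvCnt_append]
          simp [hne]
        have hcnt_self : pvCnt (pvClassOf x) (p ++ [x]) = pvCnt (pvClassOf x) p + 1 := by
          rw [pvCnt_append]; simp [hfix]
        by_cases ha : PySem.Str.isIn "async" x = true
        · have hcl : pvClassOf x = "A" := by unfold pvClassOf; rw [if_pos ha]
          have hk := whileFree_stop "A" (PySem.Set.ofList ((pvPairs p).map Prod.fst))
            (3 + (pvCnt "A" p : Int)) ((PySem.Set.ofList ((pvPairs p).map Prod.fst)).length)
            (by
              intro hmem
              have := fresh p "A" (Or.inl rfl)
              rw [PySem.Set.mem_ofList] at hmem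
              exact this (by simpa [pvStartOf] using hmem))
          have hslug : pvSlugOf p x = "A" ++ PySem.Int.toStr (3 + (pvCnt "A" p : Int)) := by
            unfold pvSlugOf
            rw [hfix]
            simp only [hcl]
            rfl
          simp only [if_pos ha, hk]
          rw [pvPairs_append, hslug]
          refine Prod.ext ?_ (Prod.ext ?_ (Prod.ext ?_ (Prod.ext ?_ ?_))) <;> simp only []
          · rw [dict_ofList_append_singleton]
          · simp only [List.map_append, List.map_cons, List.map_nil, PySem.Set.ofList_append_singleton]
          · rw [hcnt_other "S" (by rw [hcl]; decide)]
          · rw [hcl] at hcnt_self; rw [hcnt_self]; push_cast; ring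
          · rw [hcnt_other "H" (by rw [hcl]; decide)]
        · by_cases hh : PySem.Str.isIn "hybrid" x = true
          · have hcl : pvClassOf x = "H" := by
              unfold pvClassOf; rw [if_neg ha, if_pos hh]
            have hk := whileFree_stop "H" (PySem.Set.ofList ((pvPairs p).map Prod.fst))
              (2 + (pvCnt "H" p : Int)) ((PySem.Set.ofList ((pvPairs p).map Prod.fst)).length)
              (by
                intro hmem
                have := fresh p "H" (Or.inr (Or.inl rfl))
                rw [PySem.Set.mem_ofList] at hmem
                exact this (by simpa [pvStartOf] using hmem))
            have hslug : pvSlugOf p x = "H" ++ PySem.Int.toStr (2 + (pvCnt "H" p : Int)) := by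
              unfold pvSlugOf
              rw [hfix]
              simp only [hcl]
              rfl
            simp only [if_neg ha, if_pos hh, hk]
            rw [pvPairs_append, hslug]
            refine Prod.ext ?_ (Prod.ext ?_ (Prod.ext ?_ (Prod.ext ?_ ?_))) <;> simp only []
            · rw [dict_ofList_append_singleton]
            · simp only [List.map_append, List.map_cons, List.map_nil, PySem.Set.ofList_append_singleton]
            · rw [hcnt_other "S" (by rw [hcl]; decide)]
            · rw [hcnt_other "A" (by rw [hcl]; decide)]
            · rw [hcl] at hcnt_self; rw [hcnt_self]; push_cast; ring
          · have hcl : pvClassOf x = "S" := by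
              unfold pvClassOf; rw [if_neg ha, if_neg hh]
            have hk := whileFree_stop "S" (PySem.Set.ofList ((pvPairs p).map Prod.fst))
              (2 + (pvCnt "S" p : Int)) ((PySem.Set.ofList ((pvPairs p).map Prod.fst)).length)
              (by
                intro hmem
                have := fresh p "S" (Or.inr (Or.inr rfl))
                rw [PySem.Set.mem_ofList] at hmem
                exact this (by simpa [pvStartOf] using hmem))
            have hslug : pvSlugOf p x = "S" ++ PySem.Int.toStr (2 + (pvCnt "S" p : Int)) := by
              unfold pvSlugOf
              rw [hfix]
              simp only [hcl]
              rfl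
            simp only [if_neg ha, if_neg hh, hk]
            rw [pvPairs_append, hslug]
            refine Prod.ext ?_ (Prod.ext ?_ (Prod.ext ?_ (Prod.ext ?_ ?_))) <;> simp only []
            · rw [dict_ofList_append_singleton]
            · simp only [List.map_append, List.map_cons, List.map_nil, PySem.Set.ofList_append_singleton]
            · rw [hcl] at hcnt_self; rw [hcnt_self]; push_cast; ring
            · rw [hcnt_other "A" (by rw [hcl]; decide)]
            · rw [hcnt_other "H" (by rw [hcl]; decide)]

-- ===== VERDICT (by name: the statement is the Claim_ definition above) =====
theorem strategy_2_slug_spec : Claim_equal_strategy_2_slug := by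
  intro algos _
  unfold Spec_strategy_2_slug strategy_2_slug strategy_2_slug_alt
  rw [foldl_stepA_eq]
  rfl
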